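-- pv_equiv track=rewrite | github.com/lunasoft2001/skills | TranscribeYoutube/scripts/transcribe_youtube.py | find_track
-- ===== SOURCE A (Python) =====
-- def find_track(tracks: list, lang_pref: list) -> dict:
--     for lang in lang_pref:
--         for t in tracks:
--             if t.get("languageCode") == lang:
--                 return t
--         for t in tracks:
--             if t.get("languageCode", "").startswith(lang + "-"):
--                 return t
--     return tracks[0] if tracks else None
-- ===== SOURCE B (Python) =====
-- def find_track(tracks: list, lang_pref: list) -> dict:
--     # Single pass over tracks: score each track with its best (pref_index, phase)
--     # key (phase 0 = exact match, 1 = prefix match) and keep the strictly best one,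
--     # instead of A's preference-outer / track-inner nested rescans.
--     best = None  # (key, track)
--     for t in tracks:
--         lc = t.get("languageCode")
--         lcs = t.get("languageCode", "")
--         for i, lang in enumerate(lang_pref):
--             if lc == lang:
--                 k = (i, 0)
--             elif lcs.startswith(lang + "-"):
--                 k = (i, 1)
--             else:
--                 continue
--             if best is None or k < best[0]:
--                 best = (k, t)
--             break
--     if best is not None:
--         return best[1]
--     return tracks[0] if tracks else None
-- ===== Notes on version B (the rewrite author's own statement) =====
-- stated objective: alternative
-- what changed: Replaced A's preference-outer loop with two full track rescans per preference by a single pass over the tracks that scores each track with its best (pref_index, phase) key (phase 0 = exact languageCode match, 1 = prefix match) and keeps the first strictly-smallest key, with the same tracks[0]/None fallback.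
import Mathlib
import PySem

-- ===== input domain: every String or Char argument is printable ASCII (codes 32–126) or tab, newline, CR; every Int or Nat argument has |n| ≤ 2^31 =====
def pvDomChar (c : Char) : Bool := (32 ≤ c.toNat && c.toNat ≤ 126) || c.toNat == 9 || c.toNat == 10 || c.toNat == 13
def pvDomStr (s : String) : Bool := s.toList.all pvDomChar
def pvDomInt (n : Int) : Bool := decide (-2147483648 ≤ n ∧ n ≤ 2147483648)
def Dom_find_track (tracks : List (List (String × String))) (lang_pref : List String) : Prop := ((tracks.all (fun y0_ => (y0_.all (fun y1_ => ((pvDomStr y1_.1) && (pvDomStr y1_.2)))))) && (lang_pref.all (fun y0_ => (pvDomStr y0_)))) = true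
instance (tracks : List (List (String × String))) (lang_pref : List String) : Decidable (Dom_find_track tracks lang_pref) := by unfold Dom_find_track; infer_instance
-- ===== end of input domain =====

-- B replaces A's preference-outer/track-inner nested rescans by one pass over the tracks that
-- scores each track with a (pref_index, phase) key and keeps the strictly best one (alternative
-- decomposition, same worst-case cost).

-- ===== PORT A =====
-- first track whose languageCode (get, default None) equals lang
def ftAExact (tracks : List (List (String × String))) (lang : String) : Option (List (String × String)) :=
  tracks.find? (fun t => (PySem.Dict.mk t).get? "languageCode" == some lang)

-- first track whose languageCode (get, default "") starts with lang + "-"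
def ftAPrefix (tracks : List (List (String × String))) (lang : String) : Option (List (String × String)) :=
  tracks.find? (fun t => PySem.Str.startswith ((PySem.Dict.mk t).getD "languageCode" "") (lang ++ "-"))

def find_track (tracks : List (List (String × String))) (lang_pref : List String) : Option (List (String × String)) :=
  match lang_pref with
  | [] => match tracks with
          | [] => none
          | t :: _ => some t
  | lang :: rest =>
    match ftAExact tracks lang with
    | some t => some t
    | none =>
      match ftAPrefix tracks lang with
      | some t => some t
      | none => find_track tracks rest

-- ===== PORT B =====
-- Python tuple '<' on (int, int), exact for the Nat pairs B builds
def pvTlt (a b : Nat × Nat) : Bool := decide (a.1 < b.1 ∨ (a.1 = b.1 ∧ a.2 < b.2))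

-- inner loop of B: first (i, phase) match of this track against lang_pref (break at first hit)
def ftBKey (lang_pref : List String) (i : Nat) (lc : Option String) (lcs : String) : Option (Nat × Nat) :=
  match lang_pref with
  | [] => none
  | lang :: rest =>
    if lc == some lang then some (i, 0)
    else if PySem.Str.startswith lcs (lang ++ "-") then some (i, 1)
    else ftBKey rest (i + 1) lc lcs

-- body of B's 'for t in tracks' loop: update best with this track's key
def ftBStep (lang_pref : List String) (best : Option ((Nat × Nat) × List (String × String)))
    (t : List (String × String)) : Option ((Nat × Nat) × List (String × String)) :=
  match ftBKey lang_pref 0 ((PySem.Dict.mk t).get? "languageCode") ((PySem.Dict.mk t).getD "languageCode" "") with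
  | none => best
  | some k =>
    match best with
    | none => some (k, t)
    | some (bk, bt) => if pvTlt k bk then some (k, t) else some (bk, bt)

def find_track_alt (tracks : List (List (String × String))) (lang_pref : List String) : Option (List (String × String)) :=
  match tracks.foldl (ftBStep lang_pref) none with
  | some (_, bt) => some bt
  | none => match tracks with
            | [] => none
            | t :: _ => some t

-- ===== PRECONDITION & SPEC =====
def Spec_find_track (tracks : List (List (String × String))) (lang_pref : List String) (out : Option (List (String × String))) : Prop := out = find_track_alt tracks lang_pref
instance (tracks : List (List (String × String))) (lang_pref : List String) (out : Option (List (String × String))) : Decidable (Spec_find_track tracks lang_pref out) := by unfold Spec_find_track; infer_instance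

-- ===== CLAIM (what is proved, stated in full; the proofs are below) =====
def Claim_equal_find_track : Prop := ∀ (tracks : List (List (String × String))) (lang_pref : List String), Dom_find_track tracks lang_pref → Spec_find_track tracks lang_pref (find_track tracks lang_pref)

-- ===== LEMMAS AND PROOFS =====

-- the key B assigns to a track for a given preference list
def keyOf (lang_pref : List String) (t : List (String × String)) : Option (Nat × Nat) :=
  ftBKey lang_pref 0 ((PySem.Dict.mk t).get? "languageCode") ((PySem.Dict.mk t).getD "languageCode" "")

def kshift (k : Nat × Nat) : Nat × Nat := (k.1 + 1, k.2)

lemma ftBKey_shift (lang_pref : List String) (i : Nat) (lc : Option String) (lcs : String) :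
    ftBKey lang_pref (i + 1) lc lcs = (ftBKey lang_pref i lc lcs).map kshift := by
  induction lang_pref generalizing i with
  | nil => simp [ftBKey]
  | cons lang rest ih =>
    simp only [ftBKey]
    split_ifs with h1 h2 <;> simp [kshift, ih]

lemma keyOf_cons (lang : String) (rest : List String) (t : List (String × String)) :
    keyOf (lang :: rest) t =
      if (PySem.Dict.mk t).get? "languageCode" == some lang then some (0, 0)
      else if PySem.Str.startswith ((PySem.Dict.mk t).getD "languageCode" "") (lang ++ "-") then some (0, 1)
      else (keyOf rest t).map kshift := by
  simp only [keyOf, ftBKey]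
  split_ifs with h1 h2 <;> simp [ftBKey_shift]

lemma pvTlt_to_zero (k : Nat × Nat) : pvTlt k (0, 0) = false := by
  simp [pvTlt]

lemma tlt_shift (a b : Nat × Nat) : pvTlt (kshift a) (kshift b) = pvTlt a b := by
  simp only [pvTlt, kshift]
  rw [decide_eq_decide]
  omega

-- the key of a track that is not an exact match for the head preference is strictly above (0,0)
lemma key_gt_zero_zero {lang : String} {rest : List String} {t : List (String × String)} {k : Nat × Nat}
    (hne : ((PySem.Dict.mk t).get? "languageCode" == some lang) = false)
    (hk : keyOf (lang :: rest) t = some k) : pvTlt (0, 0) k = true := by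
  rw [keyOf_cons, hne] at hk
  simp only [Bool.false_eq_true, if_false] at hk
  split_ifs at hk with h2
  · cases hk; simp [pvTlt]
  · rcases Option.map_eq_some_iff.mp hk with ⟨k', _, rfl⟩
    simp [pvTlt, kshift]

-- no key of a non-exact-matching track is strictly below (0,1)
lemma key_not_lt_zero_one {lang : String} {rest : List String} {t : List (String × String)} {k : Nat × Nat}
    (hne : ((PySem.Dict.mk t).get? "languageCode" == some lang) = false)
    (hk : keyOf (lang :: rest) t = some k) : pvTlt k (0, 1) = false := by
  rw [keyOf_cons, hne] at hk
  simp only [Bool.false_eq_true, if_false] at hk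
  split_ifs at hk with h2
  · cases hk; simp [pvTlt]
  · rcases Option.map_eq_some_iff.mp hk with ⟨k', _, rfl⟩
    simp [pvTlt, kshift]

-- the key of a track whose languageCode prefix-matches nothing strictly above head is ≥ (0,1)-incomparable upward
lemma key_gt_zero_one {lang : String} {rest : List String} {t : List (String × String)} {k : Nat × Nat}
    (hne : ((PySem.Dict.mk t).get? "languageCode" == some lang) = false)
    (hnp : PySem.Str.startswith ((PySem.Dict.mk t).getD "languageCode" "") (lang ++ "-") = false)
    (hk : keyOf (lang :: rest) t = some k) : pvTlt (0, 1) k = true := by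
  rw [keyOf_cons, hne, hnp] at hk
  simp only [Bool.false_eq_true, if_false] at hk
  rcases Option.map_eq_some_iff.mp hk with ⟨k', _, rfl⟩
  simp [pvTlt, kshift]

-- property of accumulators seen before the winning track
def Good (k0 : Nat × Nat) (b : Option ((Nat × Nat) × List (String × String))) : Prop :=
  b = none ∨ ∃ k t, b = some (k, t) ∧ pvTlt k0 k = true

lemma fold_pre (P : List String) (k0 : Nat × Nat) :
    ∀ pre : List (List (String × String)),
    (∀ t ∈ pre, ∀ k, keyOf P t = some k → pvTlt k0 k = true) →
    ∀ b, Good k0 b → Good k0 (pre.foldl (ftBStep P) b) := by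
  intro pre
  induction pre with
  | nil => intro _ b hb; simpa using hb
  | cons t rest ih =>
    intro hpre b hb
    simp only [List.foldl_cons]
    apply ih (fun t ht k hk => hpre t (by simp [ht]) k hk)
    simp only [ftBStep]
    cases hK : keyOf P t with
    | none => simp only [keyOf] at hK; rw [hK]; exact hb
    | some k =>
      simp only [keyOf] at hK; rw [hK]
      have hk0 : pvTlt k0 k = true := hpre t (by simp) k (by simp only [keyOf]; exact hK)
      rcases hb with hb | ⟨bk, bt, hb, hbk⟩
      · subst hb; exact Or.inr ⟨k, t, rfl, hk0⟩
      · subst hb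
        by_cases hcmp : pvTlt k bk = true
        · simp only [hcmp, if_true]; exact Or.inr ⟨k, t, rfl, hk0⟩
        · rw [Bool.not_eq_true] at hcmp
          simp only [hcmp, Bool.false_eq_true, if_false]
          exact Or.inr ⟨bk, bt, rfl, hbk⟩

lemma fold_keep (P : List String) (k0 : Nat × Nat) (t0 : List (String × String)) :
    ∀ post : List (List (String × String)),
    (∀ t ∈ post, ∀ k, keyOf P t = some k → pvTlt k k0 = false) →
    post.foldl (ftBStep P) (some (k0, t0)) = some (k0, t0) := by
  intro post
  induction post with
  | nil => intro _; rfl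
  | cons t rest ih =>
    intro hpost
    simp only [List.foldl_cons]
    have hstep : ftBStep P (some (k0, t0)) t = some (k0, t0) := by
      simp only [ftBStep]
      cases hK : keyOf P t with
      | none => simp only [keyOf] at hK; rw [hK]
      | some k =>
        simp only [keyOf] at hK; rw [hK]
        have hc := hpost t (by simp) k (by simp only [keyOf]; exact hK)
        simp [hc]
    rw [hstep]
    exact ih (fun t ht k hk => hpost t (by simp [ht]) k hk)

-- the main fold lemma: the first track achieving the (weakly minimal) key k0 wins
lemma fold_first_min (P : List String) (k0 : Nat × Nat) (t0 : List (String × String))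
    (pre post : List (List (String × String)))
    (ht0 : keyOf P t0 = some k0)
    (hpre : ∀ t ∈ pre, ∀ k, keyOf P t = some k → pvTlt k0 k = true)
    (hpost : ∀ t ∈ post, ∀ k, keyOf P t = some k → pvTlt k k0 = false) :
    (pre ++ t0 :: post).foldl (ftBStep P) none = some (k0, t0) := by
  rw [List.foldl_append]
  have hgood := fold_pre P k0 pre hpre none (Or.inl rfl)
  simp only [List.foldl_cons]
  have hstep : ftBStep P (pre.foldl (ftBStep P) none) t0 = some (k0, t0) := by
    simp only [ftBStep]
    simp only [keyOf] at ht0; rw [ht0]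
    rcases hgood with hb | ⟨bk, bt, hb, hbk⟩
    · rw [hb]
    · rw [hb]; simp [hbk]
  rw [hstep]
  exact fold_keep P k0 t0 post hpost

lemma fold_none (P : List String) :
    ∀ tracks : List (List (String × String)),
    (∀ t ∈ tracks, keyOf P t = none) →
    tracks.foldl (ftBStep P) none = none := by
  intro tracks
  induction tracks with
  | nil => intro _; rfl
  | cons t rest ih =>
    intro h
    simp only [List.foldl_cons]
    have hstep : ftBStep P none t = none := by
      simp only [ftBStep]
      have hK := h t (by simp)
      simp only [keyOf] at hK; rw [hK]
    rw [hstep]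
    exact ih (fun t ht => h t (by simp [ht]))

-- shift invariance: if every key is the kshift of the smaller-problem key,
-- the fold result is the mapped result of the smaller fold
lemma fold_shift (P1 P2 : List String) :
    ∀ tracks : List (List (String × String)),
    (∀ t ∈ tracks, keyOf P2 t = (keyOf P1 t).map kshift) →
    ∀ b, tracks.foldl (ftBStep P2) (b.map (fun p => (kshift p.1, p.2))) =
      (tracks.foldl (ftBStep P1) b).map (fun p => (kshift p.1, p.2)) := by
  intro tracks
  induction tracks with
  | nil => intro _ b; rfl
  | cons t rest ih =>
    intro h b
    simp only [List.foldl_cons]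
    have hstep : ftBStep P2 (b.map (fun p => (kshift p.1, p.2))) t =
        (ftBStep P1 b t).map (fun p => (kshift p.1, p.2)) := by
      simp only [ftBStep]
      have h2 := h t (by simp)
      simp only [keyOf] at h2
      rw [h2]
      cases hK : ftBKey P1 0 ((PySem.Dict.mk t).get? "languageCode")
          ((PySem.Dict.mk t).getD "languageCode" "") with
      | none => simp
      | some k =>
        simp only [Option.map_some]
        cases b with
        | none => simp
        | some p =>
          obtain ⟨bk, bt⟩ := p
          simp only [Option.map_some]
          rw [tlt_shift]
          by_cases hc : pvTlt k bk = true
          · rw [hc]; simp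
          · rw [Bool.not_eq_true] at hc; rw [hc]; simp
    rw [hstep]
    exact ih (fun t ht => h t (by simp [ht])) (ftBStep P1 b t)

lemma bool_not_pred {α : Type} {p : α → Bool} {a : α} (h : (!p a) = true) : p a = false := by
  simpa using h

-- main equivalence, by induction on the preference list
lemma find_track_eq_alt : ∀ (lang_pref : List String) (tracks : List (List (String × String))),
    find_track tracks lang_pref = find_track_alt tracks lang_pref := by
  intro lang_pref
  induction lang_pref with
  | nil =>
    intro tracks
    simp only [find_track, find_track_alt]
    rw [fold_none [] tracks (fun t _ => rfl)]
  | cons lang rest ih =>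
    intro tracks
    simp only [find_track]
    cases hE : ftAExact tracks lang with
    | some t0 =>
      rw [ftAExact] at hE
      obtain ⟨hp0, pre, post, htr, hpre⟩ := List.find?_eq_some_iff_append.mp hE
      have hkey0 : keyOf (lang :: rest) t0 = some (0, 0) := by
        rw [keyOf_cons, hp0]; simp
      have hfold : tracks.foldl (ftBStep (lang :: rest)) none = some ((0, 0), t0) := by
        rw [htr]
        refine fold_first_min _ _ _ _ _ hkey0 ?_ ?_
        · intro t ht k hk
          exact key_gt_zero_zero (bool_not_pred (hpre t ht)) hk
        · intro t _ k _
          exact pvTlt_to_zero k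
      simp only [find_track_alt, hfold]
    | none =>
      have hEnone : ∀ t ∈ tracks, ((PySem.Dict.mk t).get? "languageCode" == some lang) = false := by
        intro t ht
        rw [ftAExact] at hE
        have := List.find?_eq_none.mp hE t ht
        simpa using this
      cases hP : ftAPrefix tracks lang with
      | some t1 =>
        rw [ftAPrefix] at hP
        obtain ⟨hp1, pre, post, htr, hpre⟩ := List.find?_eq_some_iff_append.mp hP
        have ht1mem : t1 ∈ tracks := by rw [htr]; simp
        have hkey1 : keyOf (lang :: rest) t1 = some (0, 1) := by
          rw [keyOf_cons, hEnone t1 ht1mem, hp1]; simp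
        have hfold : tracks.foldl (ftBStep (lang :: rest)) none = some ((0, 1), t1) := by
          rw [htr]
          refine fold_first_min _ _ _ _ _ hkey1 ?_ ?_
          · intro t ht k hk
            have htm : t ∈ tracks := by rw [htr]; simp [ht]
            exact key_gt_zero_one (hEnone t htm) (bool_not_pred (hpre t ht)) hk
          · intro t ht k hk
            have htm : t ∈ tracks := by rw [htr]; simp [ht]
            exact key_not_lt_zero_one (hEnone t htm) hk
        simp only [find_track_alt, hfold]
      | none =>
        have hPnone : ∀ t ∈ tracks,
            PySem.Str.startswith ((PySem.Dict.mk t).getD "languageCode" "") (lang ++ "-") = false := by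
          intro t ht
          rw [ftAPrefix] at hP
          have := List.find?_eq_none.mp hP t ht
          simpa using this
        have hkeys : ∀ t ∈ tracks, keyOf (lang :: rest) t = (keyOf rest t).map kshift := by
          intro t ht
          rw [keyOf_cons, hEnone t ht, hPnone t ht]
          simp
        have hfold := fold_shift rest (lang :: rest) tracks hkeys none
        simp only [Option.map_none] at hfold
        rw [ih tracks]
        simp only [find_track_alt, hfold]
        cases hF : tracks.foldl (ftBStep rest) none with
        | none => simp
        | some p => obtain ⟨bk, bt⟩ := p; simp

-- ===== VERDICT (by name: the statement is the Claim_ definition above) =====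
theorem find_track_spec : Claim_equal_find_track := by
  intro tracks lang_pref _
  show find_track tracks lang_pref = find_track_alt tracks lang_pref
  exact find_track_eq_alt lang_pref tracks
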